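-- pv_equiv track=rewrite | github.com/aayushiarora/Algorithms | Organizing_Containers_of_Balls.py | organizingContainers
-- ===== SOURCE A (Python) =====
-- def organizingContainers(container):
--     a=[]
--     b=[]
--     for i in container:
--         a.append(sum(i))
--     for j in list(zip(*container)):
--         b.append(sum(j))
--     a.sort()
--     b.sort()
--
--     if a==b:
--         return "Possible"
--     else:
--         return "Impossible"
-- ===== SOURCE B (Python) =====
-- def organizingContainers(container):
--     row_sums = [sum(r) for r in container]
--     col_sums = [sum(c) for c in zip(*container)]
--     diff = {}
--     for s in row_sums:
--         diff[s] = diff.get(s, 0) + 1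
--     for s in col_sums:
--         diff[s] = diff.get(s, 0) - 1
--     return "Possible" if all(v == 0 for v in diff.values()) else "Impossible"
-- ===== Notes on version B (the rewrite author's own statement) =====
-- stated objective: alternative
-- what changed: Replaces sort-both-lists-then-compare with a single signed-count dictionary (+1 per row sum, -1 per column sum) checked for all zeros, eliminating both sorts.
import Mathlib
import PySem

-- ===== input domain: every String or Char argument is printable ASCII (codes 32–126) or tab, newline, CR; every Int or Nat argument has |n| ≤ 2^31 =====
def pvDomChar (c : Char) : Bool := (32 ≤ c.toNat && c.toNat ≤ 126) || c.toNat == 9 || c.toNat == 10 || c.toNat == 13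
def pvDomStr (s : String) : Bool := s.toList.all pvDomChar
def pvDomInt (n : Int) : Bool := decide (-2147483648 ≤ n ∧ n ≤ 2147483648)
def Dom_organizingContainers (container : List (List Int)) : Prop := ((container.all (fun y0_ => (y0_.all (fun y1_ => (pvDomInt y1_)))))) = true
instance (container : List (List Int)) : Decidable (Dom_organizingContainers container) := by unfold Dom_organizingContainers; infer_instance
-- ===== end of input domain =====

-- B replaces sort-both-lists-then-compare with one signed-count dictionary (+1 per row sum, -1 per column sum) checked for all zeros; objective: alternative.

-- shared helper: zip(*rows) — tuples become lists; the number of rows of the result is the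
-- minimum row length, so the index j is in range for every row and getD's default is never used (exact).
def pyTranspose (rows : List (List Int)) : List (List Int) :=
  match (rows.map List.length).min? with
  | none => []
  | some m => (List.range m).map (fun j => rows.map (fun r => r.getD j 0))

-- ===== PORT A =====
def organizingContainers (container : List (List Int)) : String :=
  let a := container.foldl (fun acc i => acc ++ [i.sum]) []
  let b := (pyTranspose container).foldl (fun acc j => acc ++ [j.sum]) []
  let a := PySem.List.sorted a (fun x => x) false
  let b := PySem.List.sorted b (fun x => x) false
  if a = b then "Possible" else "Impossible"

-- ===== PORT B =====
def organizingContainers_alt (container : List (List Int)) : String :=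
  let rowSums := container.map List.sum
  let colSums := (pyTranspose container).map List.sum
  let d1 := rowSums.foldl (fun d s => d.modify s 0 (· + 1)) (PySem.Dict.empty : PySem.Dict Int Int)
  let d2 := colSums.foldl (fun d s => d.modify s 0 (· - 1)) d1
  if d2.values.all (fun v => v == 0) then "Possible" else "Impossible"

-- ===== PRECONDITION & SPEC =====
def Spec_organizingContainers (container : List (List Int)) (out : String) : Prop := out = organizingContainers_alt container
instance (container : List (List Int)) (out : String) : Decidable (Spec_organizingContainers container out) := by unfold Spec_organizingContainers; infer_instance

-- ===== CLAIM (what is proved, stated in full; the proofs are below) =====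
def Claim_equal_organizingContainers : Prop := ∀ (container : List (List Int)), Dom_organizingContainers container → Spec_organizingContainers container (organizingContainers container)

-- ===== LEMMAS AND PROOFS =====

-- A's append loop builds the map of sums
theorem foldl_append_sum (l : List (List Int)) (acc : List Int) :
    l.foldl (fun acc i => acc ++ [i.sum]) acc = acc ++ l.map List.sum := by
  induction l generalizing acc with
  | nil => simp
  | cons x xs ih => simp [List.foldl, ih]

-- the +1 loop counts occurrences (on top of any start dict)
theorem getD_foldl_add (l : List Int) (d : PySem.Dict Int Int) (v : Int) :
    (l.foldl (fun d s => d.modify s 0 (· + 1)) d).getD v 0 = d.getD v 0 + l.count v := by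
  exact PySem.Dict.getD_foldl_modify_add_one l d v

-- the -1 loop subtracts occurrences
theorem getD_foldl_sub (l : List Int) (d : PySem.Dict Int Int) (v : Int) :
    (l.foldl (fun d s => d.modify s 0 (· - 1)) d).getD v 0 = d.getD v 0 - l.count v := by
  induction l generalizing d with
  | nil => simp
  | cons x xs ih =>
    simp only [List.foldl, ih, PySem.Dict.getD_modify, List.count_cons]
    by_cases h : v = x <;> simp [h] <;> omega

theorem organizingContainers_spec : Claim_equal_organizingContainers := by
  intro container _
  unfold Spec_organizingContainers organizingContainers organizingContainers_alt
  simp only [foldl_append_sum, List.nil_append]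
  set ra := container.map List.sum with hra
  set ca := (pyTranspose container).map List.sum with hca
  set d1 := ra.foldl (fun d s => d.modify s 0 (· + 1)) (PySem.Dict.empty : PySem.Dict Int Int) with hd1
  set d2 := ca.foldl (fun d s => d.modify s 0 (· - 1)) d1 with hd2
  have hget : ∀ v, d2.getD v 0 = (ra.count v : Int) - ca.count v := by
    intro v
    rw [hd2, getD_foldl_sub, hd1, getD_foldl_add]
    simp
  have hnd1 : d1.keys.Nodup := by
    rw [hd1]
    exact PySem.Dict.nodup_keys_foldl_modify_key ra (fun x => x) 0 (fun _ _ => (· + 1))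
      (PySem.Dict.empty : PySem.Dict Int Int) (by simp)
  have hnd : d2.keys.Nodup := by
    rw [hd2]
    exact PySem.Dict.nodup_keys_foldl_modify_key ca (fun x => x) 0 (fun _ _ => (· - 1)) d1 hnd1
  have hkeys : ∀ k : Int, k ∈ d2.keys ↔ k ∈ ra ∨ k ∈ ca := by
    intro k
    rw [hd2, PySem.Dict.keys_foldl_modify, hd1, PySem.Dict.keys_foldl_modify]
    simp [PySem.Set.mem_update]
  have hall : (d2.values.all (fun v => v == 0)) = true ↔ ra.Perm ca := by
    rw [PySem.Dict.values_eq_map_keys d2 hnd 0]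
    rw [List.all_map, List.all_eq_true]
    constructor
    · intro h
      rw [List.perm_iff_count]
      intro v
      by_cases hv : v ∈ ra ∨ v ∈ ca
      · have := h v ((hkeys v).mpr hv)
        simp only [Function.comp, beq_iff_eq, hget] at this
        omega
      · push_neg at hv
        rw [List.count_eq_zero_of_not_mem hv.1, List.count_eq_zero_of_not_mem hv.2]
    · intro hperm k hk
      simp only [Function.comp, beq_iff_eq, hget]
      rw [List.perm_iff_count] at hperm
      rw [hperm k]
      omega
  have hsort : (PySem.List.sorted ra (fun x => x) false = PySem.List.sorted ca (fun x => x) false)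
      ↔ ra.Perm ca := PySem.List.sorted_id_eq_sorted_id_iff_perm ra ca
  by_cases h : ra.Perm ca
  · rw [if_pos (hsort.mpr h), if_pos (hall.mpr h)]
  · rw [if_neg (fun hc => h (hsort.mp hc)), if_neg (fun hc => h (hall.mp hc))]
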